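-- pv_equiv track=rewrite | github.com/cknoll/chimcla | stage_2a_bar_selection.py | find_missing_boxes
-- ===== SOURCE A (Python) =====
-- import itertools as it
-- import itertools as it
--
-- def index_combinations():
--     return list(it.product(range(3), range(27)))
--
-- def find_missing_boxes(bbox_list):
--     """
--     Iterate through a list of (extended) bounding boxes
--     """
--
--     idcs = index_combinations()
--     for bbox in bbox_list:
--         row_col = tuple(bbox[-2:])
--
--         try:
--             idcs.remove(row_col)
--         except ValueError:
--             msg = f"unexpected row_col index pair: {row_col}"
--             raise ValueError(msg)
--
--     # in the nominal case this list is now empty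
--     return idcs
-- ===== SOURCE B (Python) =====
-- import itertools as it
--
-- def find_missing_boxes(bbox_list):
--     """
--     Iterate through a list of (extended) bounding boxes
--     """
--     valid = set(it.product(range(3), range(27)))
--     seen = set()
--     for bbox in bbox_list:
--         row_col = tuple(bbox[-2:])
--         if row_col not in valid or row_col in seen:
--             msg = f"unexpected row_col index pair: {row_col}"
--             raise ValueError(msg)
--         seen.add(row_col)
--     return [p for p in it.product(range(3), range(27)) if p not in seen]
-- ===== Notes on version B (the rewrite author's own statement) =====
-- stated objective: alternative
-- what changed: Instead of mutating the full index list by repeated list.remove (a linear scan per bbox), B validates each row_col pair against a precomputed set of valid pairs and a 'seen' set in one pass, then produces the result by a separate filtering pass over the product in its original order.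
import Mathlib
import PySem

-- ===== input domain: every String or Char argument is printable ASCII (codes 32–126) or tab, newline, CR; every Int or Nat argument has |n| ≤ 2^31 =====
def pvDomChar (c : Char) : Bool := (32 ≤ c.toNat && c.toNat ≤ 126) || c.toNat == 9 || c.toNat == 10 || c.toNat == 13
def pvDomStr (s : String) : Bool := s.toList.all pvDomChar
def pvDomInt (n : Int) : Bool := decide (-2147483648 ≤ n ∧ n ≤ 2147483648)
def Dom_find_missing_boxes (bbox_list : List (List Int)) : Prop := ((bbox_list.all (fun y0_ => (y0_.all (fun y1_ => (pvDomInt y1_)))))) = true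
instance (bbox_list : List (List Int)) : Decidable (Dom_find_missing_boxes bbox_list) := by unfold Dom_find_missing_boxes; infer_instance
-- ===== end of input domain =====

-- B replaces A's mutate-and-remove single pass by a validate-into-a-seen-set pass plus a
-- separate filtering pass over the product list; equivalence is about the return value
-- (A mutates only its local list, no argument).

-- row_col = tuple(bbox[-2:]) : it is a pair exactly when the slice has two elements;
-- a tuple of other arity can never match a pair in the (Int × Int) lists, which in
-- Python makes list.remove raise / the set tests fail — both ports treat that as the
-- raising case (excluded by Pre_).
def rc? (bbox : List Int) : Option (Int × Int) :=
  match PySem.List.slice bbox (some (-2)) none with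
  | [r, c] => some (r, c)
  | _ => none

-- ===== PORT A =====
-- list(it.product(range(3), range(27)))
def index_combinations : List (Int × Int) :=
  (PySem.List.pyRange 0 3 1).flatMap (fun r => (PySem.List.pyRange 0 27 1).map (fun c => (r, c)))

-- the for-loop of A: idcs.remove(row_col); ValueError (= none from remove?) is
-- excluded by Pre_, the port returns [] there (nothing is claimed on those inputs)
def loopA : List (List Int) → List (Int × Int) → List (Int × Int)
  | [], idcs => idcs
  | bbox :: rest, idcs =>
    match rc? bbox with
    | some p =>
      match PySem.List.remove? idcs p with
      | some idcs' => loopA rest idcs'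
      | none => []      -- ValueError re-raised
    | none => []        -- row_col not a pair: list.remove raises ValueError

def find_missing_boxes (bbox_list : List (List Int)) : List (Int × Int) :=
  loopA bbox_list index_combinations

-- ===== PORT B =====
-- set(it.product(range(3), range(27)))
def validSet : PySem.Set (Int × Int) :=
  PySem.Set.ofList ((PySem.List.pyRange 0 3 1).flatMap (fun r => (PySem.List.pyRange 0 27 1).map (fun c => (r, c))))

-- the for-loop of B: build 'seen'; none = the raised ValueError (excluded by Pre_)
def loopB : List (List Int) → PySem.Set (Int × Int) → Option (PySem.Set (Int × Int))
  | [], seen => some seen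
  | bbox :: rest, seen =>
    match rc? bbox with
    | some p =>
      if p ∉ validSet ∨ p ∈ seen then none    -- raise ValueError
      else loopB rest (PySem.Set.add seen p)
    | none => none      -- row_col not a pair: not in valid, raise ValueError

def find_missing_boxes_alt (bbox_list : List (List Int)) : List (Int × Int) :=
  match loopB bbox_list PySem.Set.empty with
  | some seen =>
    ((PySem.List.pyRange 0 3 1).flatMap (fun r => (PySem.List.pyRange 0 27 1).map (fun c => (r, c)))).filter
      (fun p => p ∉ seen)
  | none => []          -- ValueError

-- ===== PRECONDITION & SPEC =====
-- Pre_ excludes exactly the inputs where A raises ValueError (row_col not a pair in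
-- range(3)×range(27), or a duplicate row_col); B raises the same ValueError there.
def Pre_find_missing_boxes (bbox_list : List (List Int)) : Prop :=
  (bbox_list.all (fun b =>
      match rc? b with
      | some (r, c) => decide (0 ≤ r ∧ r < 3 ∧ 0 ≤ c ∧ c < 27)
      | none => false)) = true
  ∧ (bbox_list.filterMap rc?).Nodup

instance (bbox_list : List (List Int)) : Decidable (Pre_find_missing_boxes bbox_list) := by
  unfold Pre_find_missing_boxes; infer_instance

def pvWitness_find_missing_boxes : List (List Int) := [[10, 20, 0, 0], [1, 5], [2, 26]]

def Spec_find_missing_boxes (bbox_list : List (List Int)) (out : List (Int × Int)) : Prop := out = find_missing_boxes_alt bbox_list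
instance (bbox_list : List (List Int)) (out : List (Int × Int)) : Decidable (Spec_find_missing_boxes bbox_list out) := by unfold Spec_find_missing_boxes; infer_instance

-- ===== CLAIM (what is proved, stated in full; the proofs are below) =====
def Claim_equal_find_missing_boxes : Prop := ∀ (bbox_list : List (List Int)), Dom_find_missing_boxes bbox_list → Pre_find_missing_boxes bbox_list → Spec_find_missing_boxes bbox_list (find_missing_boxes bbox_list)

-- ===== LEMMAS AND PROOFS =====

theorem mem_index_combinations (p : Int × Int) :
    p ∈ index_combinations ↔ 0 ≤ p.1 ∧ p.1 < 3 ∧ 0 ≤ p.2 ∧ p.2 < 27 := by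
  obtain ⟨r, c⟩ := p
  simp only [index_combinations, List.mem_flatMap, List.mem_map, Prod.mk.injEq]
  constructor
  · rintro ⟨r', hr', c', hc', rfl, rfl⟩
    rw [PySem.List.mem_pyRange_one] at hr' hc'
    exact ⟨hr'.1, hr'.2, hc'.1, hc'.2⟩
  · rintro ⟨h1, h2, h3, h4⟩
    exact ⟨r, PySem.List.mem_pyRange_one.mpr ⟨h1, h2⟩, c,
      PySem.List.mem_pyRange_one.mpr ⟨h3, h4⟩, rfl, rfl⟩

theorem nodup_index_combinations : index_combinations.Nodup := by decide

theorem loopA_eq_filter (bs : List (List Int)) (idcs : List (Int × Int))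
    (hnd : idcs.Nodup)
    (hsome : ∀ b ∈ bs, ∃ p, rc? b = some p ∧ p ∈ idcs)
    (hpnd : (bs.filterMap rc?).Nodup) :
    loopA bs idcs = idcs.filter (fun x => x ∉ bs.filterMap rc?) := by
  induction bs generalizing idcs with
  | nil => simp [loopA]
  | cons b rest ih =>
    obtain ⟨p, hp, hmem⟩ := hsome b (by simp)
    have hfm : (b :: rest).filterMap rc? = p :: rest.filterMap rc? := by
      simp [hp]
    rw [hfm] at hpnd
    have hpnotin : p ∉ rest.filterMap rc? := (List.nodup_cons.mp hpnd).1
    have hrestnd : (rest.filterMap rc?).Nodup := (List.nodup_cons.mp hpnd).2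
    rw [show loopA (b :: rest) idcs =
        (match PySem.List.remove? idcs p with
          | some idcs' => loopA rest idcs'
          | none => []) from by simp [loopA, hp]]
    rw [PySem.List.remove?_eq_some_erase idcs p hmem]
    show loopA rest (idcs.erase p) = _
    have herase : idcs.erase p = idcs.filter (fun x => x ≠ p) := by
      rw [List.Nodup.erase_eq_filter hnd]
      apply List.filter_congr; intro x _
      by_cases h : x = p <;> simp [h]
    rw [ih (idcs.erase p) (hnd.erase p) ?_ hrestnd]
    · rw [herase, List.filter_filter, hfm]
      apply List.filter_congr
      intro x _
      by_cases hxp : x = p <;> simp [hxp, hpnotin]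
    · intro b' hb'
      obtain ⟨q, hq, hqm⟩ := hsome b' (by simp [hb'])
      refine ⟨q, hq, ?_⟩
      have hqp : q ≠ p := by
        intro h; subst h
        exact hpnotin (List.mem_filterMap.mpr ⟨b', hb', hq⟩)
      exact (List.mem_erase_of_ne hqp).mpr hqm

theorem loopB_eq_some (bs : List (List Int)) (seen : PySem.Set (Int × Int))
    (hsome : ∀ b ∈ bs, ∃ p, rc? b = some p ∧ p ∈ validSet)
    (hnd : (seen ++ bs.filterMap rc?).Nodup) :
    loopB bs seen = some (seen ++ bs.filterMap rc?) := by
  induction bs generalizing seen with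
  | nil => simp [loopB]
  | cons b rest ih =>
    obtain ⟨p, hp, hval⟩ := hsome b (by simp)
    have hfm : (b :: rest).filterMap rc? = p :: rest.filterMap rc? := by
      simp [hp]
    rw [hfm] at hnd ⊢
    have hps : p ∉ seen := by
      intro h
      exact (List.disjoint_of_nodup_append hnd) h (by simp)
    rw [show loopB (b :: rest) seen =
        (if p ∉ validSet ∨ p ∈ seen then none
         else loopB rest (PySem.Set.add seen p)) from by simp [loopB, hp]]
    rw [if_neg (by push Not; exact ⟨hval, hps⟩)]
    rw [PySem.Set.add_of_not_mem hps]
    rw [ih (seen ++ [p]) (fun b' hb' => hsome b' (by simp [hb'])) (by simpa using hnd)]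
    simp

theorem find_missing_boxes_spec : Claim_equal_find_missing_boxes := by
  intro bbox_list _hdom hpre
  obtain ⟨hall, hnd⟩ := hpre
  have hsome : ∀ b ∈ bbox_list, ∃ p, rc? b = some p ∧
      (0 ≤ p.1 ∧ p.1 < 3 ∧ 0 ≤ p.2 ∧ p.2 < 27) := by
    intro b hb
    have hb' := List.all_eq_true.mp hall b hb
    cases h : rc? b with
    | none => simp [h] at hb'
    | some p =>
      obtain ⟨r, c⟩ := p
      rw [h] at hb'
      exact ⟨(r, c), rfl, of_decide_eq_true hb'⟩
  have hvalid : ∀ p : Int × Int, p ∈ validSet ↔ p ∈ index_combinations := by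
    intro p
    show p ∈ PySem.Set.ofList index_combinations ↔ p ∈ index_combinations
    exact PySem.Set.mem_ofList index_combinations p
  unfold Spec_find_missing_boxes find_missing_boxes find_missing_boxes_alt
  rw [loopB_eq_some bbox_list PySem.Set.empty
      (fun b hb => by
        obtain ⟨p, hp, hr⟩ := hsome b hb
        exact ⟨p, hp, (hvalid p).mpr ((mem_index_combinations p).mpr hr)⟩)
      (by simpa [PySem.Set.empty] using hnd)]
  simp only [PySem.Set.empty, List.nil_append]
  rw [loopA_eq_filter bbox_list index_combinations nodup_index_combinations
      (fun b hb => by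
        obtain ⟨p, hp, hr⟩ := hsome b hb
        exact ⟨p, hp, (mem_index_combinations p).mpr hr⟩)
      hnd]
  rfl
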